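-- pv_equiv track=rewrite | github.com/Jeffrey04/aoc | 2022/day6/aoc2022-d6-python/src/aoc2022_d6_python/day6.py | check_is_start_packet
-- ===== SOURCE A (Python) =====
-- def check_is_start_packet(idx: int, datastream: str, size: int = 4) -> bool:
--     return not (
--         idx < (size - 1)
--         or any(
--             len(datastream[idx - (size - 1) : idx + 1].split(character)) > 2
--             for character in datastream[idx - (size - 1) : idx + 1]
--         )
--     )
-- ===== SOURCE B (Python) =====
-- def check_is_start_packet(idx: int, datastream: str, size: int = 4) -> bool:
--     window = datastream[idx - (size - 1) : idx + 1]
--     return idx >= size - 1 and len(set(window)) == len(window)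
-- ===== Notes on version B (the rewrite author's own statement) =====
-- stated objective: simpler
-- what changed: Replaces the per-character split-and-count scan (one str.split over the whole window for every character, O(size^2)) with a single set construction compared by length (O(size)); the generator/any loop disappears.
import Mathlib
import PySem

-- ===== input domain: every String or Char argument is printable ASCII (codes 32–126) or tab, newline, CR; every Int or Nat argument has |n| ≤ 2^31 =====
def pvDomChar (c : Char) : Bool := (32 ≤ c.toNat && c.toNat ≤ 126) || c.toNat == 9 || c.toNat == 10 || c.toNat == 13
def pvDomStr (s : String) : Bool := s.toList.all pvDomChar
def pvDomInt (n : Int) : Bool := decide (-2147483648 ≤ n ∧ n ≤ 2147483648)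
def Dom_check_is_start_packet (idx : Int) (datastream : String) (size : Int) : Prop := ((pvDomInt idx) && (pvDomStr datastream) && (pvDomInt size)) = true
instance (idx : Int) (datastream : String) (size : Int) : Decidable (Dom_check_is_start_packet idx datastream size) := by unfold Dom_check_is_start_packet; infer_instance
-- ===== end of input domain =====

-- B replaces A's per-character split-and-count scan of the window with a single
-- distinct-elements (set) construction compared by length (objective: simpler).

-- ===== PORT A =====
-- not (idx < size-1 or any(len(window.split(c)) > 2 for c in window))
def check_is_start_packet (idx : Int) (datastream : String) (size : Int) : Bool :=
  !(decide (idx < size - 1) ||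
    (PySem.List.slice datastream.toList (some (idx - (size - 1))) (some (idx + 1))).any
      (fun character =>
        decide (2 < (PySem.Chars.splitOn
          (PySem.List.slice datastream.toList (some (idx - (size - 1))) (some (idx + 1)))
          [character]).length)))

-- ===== PORT B =====
-- window = datastream[idx-(size-1):idx+1]; return idx >= size-1 and len(set(window)) == len(window)
def check_is_start_packet_alt (idx : Int) (datastream : String) (size : Int) : Bool :=
  let window := PySem.List.slice datastream.toList (some (idx - (size - 1))) (some (idx + 1))
  decide (size - 1 ≤ idx) && decide ((PySem.Set.ofList window).length = window.length)

-- ===== PRECONDITION & SPEC =====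
def Spec_check_is_start_packet (idx : Int) (datastream : String) (size : Int) (out : Bool) : Prop := out = check_is_start_packet_alt idx datastream size
instance (idx : Int) (datastream : String) (size : Int) (out : Bool) : Decidable (Spec_check_is_start_packet idx datastream size out) := by unfold Spec_check_is_start_packet; infer_instance

-- ===== CLAIM (what is proved, stated in full; the proofs are below) =====
def Claim_equal_check_is_start_packet : Prop := ∀ (idx : Int) (datastream : String) (size : Int), Dom_check_is_start_packet idx datastream size → Spec_check_is_start_packet idx datastream size (check_is_start_packet idx datastream size)

-- ===== LEMMAS AND PROOFS =====

-- splitting on a single character yields count + 1 pieces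
theorem splitOn_go_single (c : Char) : ∀ (fuel : Nat) (l cur : List Char) (acc : List (List Char)),
    l.length ≤ fuel →
    (PySem.Chars.splitOn.go [c] fuel l cur acc).length = acc.length + l.count c + 1 := by
  intro fuel
  induction fuel with
  | zero =>
    intro l cur acc h
    have hl : l = [] := List.eq_nil_of_length_eq_zero (Nat.le_zero.mp h)
    subst hl
    simp [PySem.Chars.splitOn.go]
  | succ n ih =>
    intro l cur acc h
    cases l with
    | nil => simp [PySem.Chars.splitOn.go]
    | cons c' rest =>
      by_cases hc : c = c'
      · subst hc
        have hpre : List.isPrefixOf [c] (c :: rest) = true := by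
          simp [List.isPrefixOf]
        simp only [PySem.Chars.splitOn.go, hpre, if_pos]
        rw [show (List.drop [c].length (c :: rest)) = rest by simp]
        rw [ih rest [] (cur.reverse :: acc) (by simpa using Nat.le_of_succ_le_succ h)]
        simp
        omega
      · have hpre : List.isPrefixOf [c] (c' :: rest) = false := by
          simpa [List.isPrefixOf] using hc
        simp only [PySem.Chars.splitOn.go, hpre]
        rw [if_neg (by simp)]
        rw [ih rest (c' :: cur) acc (Nat.le_of_succ_le_succ h)]
        simp [Ne.symm hc]

theorem length_splitOn_single (s : List Char) (c : Char) :
    (PySem.Chars.splitOn s [c]).length = s.count c + 1 := by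
  unfold PySem.Chars.splitOn
  rw [splitOn_go_single c (s.length + 1) s [] [] (Nat.le_succ _)]
  simp

theorem ofList_append_singleton (xs : List Char) (x : Char) :
    PySem.Set.ofList (xs ++ [x]) =
      if x ∈ PySem.Set.ofList xs then PySem.Set.ofList xs else PySem.Set.ofList xs ++ [x] := by
  unfold PySem.Set.ofList
  rw [List.foldl_append]
  simp [PySem.Set.add]

-- the distinct-elements list has full length iff the list has no duplicates
theorem ofList_eq_self_of_nodup (w : List Char) (h : w.Nodup) :
    PySem.Set.ofList w = w := by
  induction w using List.reverseRecOn with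
  | nil => rfl
  | append_singleton xs x ih =>
    simp only [List.nodup_append, List.nodup_singleton] at h
    rw [ofList_append_singleton, ih h.1]
    rw [if_neg (fun hm => h.2.2 x hm x (by simp) rfl)]

theorem length_ofList_lt_of_not_nodup (w : List Char) (h : ¬ w.Nodup) :
    (PySem.Set.ofList w).length < w.length := by
  induction w using List.reverseRecOn with
  | nil => exact absurd List.nodup_nil h
  | append_singleton xs x ih =>
    by_cases hn : xs.Nodup
    · have hx : x ∈ xs := by
        by_contra hx
        refine h ?_
        simp only [List.nodup_append, List.nodup_singleton, hn, true_and]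
        exact fun a ha b hb hab => hx ((hab.trans (List.mem_singleton.mp hb)) ▸ ha)
      rw [ofList_append_singleton, if_pos (by rwa [ofList_eq_self_of_nodup xs hn])]
      rw [ofList_eq_self_of_nodup xs hn]
      simp
    · have hlt := ih hn
      rw [ofList_append_singleton]
      split
      · simp; omega
      · simp; omega

theorem length_ofList_eq_iff (w : List Char) :
    ((PySem.Set.ofList w).length = w.length) ↔ w.Nodup := by
  constructor
  · intro h
    by_contra hn
    exact absurd h (Nat.ne_of_lt (length_ofList_lt_of_not_nodup w hn))
  · intro h
    rw [ofList_eq_self_of_nodup w h]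

theorem any_split_iff (w : List Char) :
    (w.any (fun c => decide (2 < (PySem.Chars.splitOn w [c]).length)) = true) ↔ ¬ w.Nodup := by
  simp only [List.any_eq_true, decide_eq_true_eq, length_splitOn_single]
  constructor
  · rintro ⟨c, _, hc⟩
    intro hn
    have := List.nodup_iff_count_le_one.mp hn c
    omega
  · intro hn
    have : ∃ c, 2 ≤ w.count c := by
      by_contra hc
      push Not at hc
      exact hn (List.nodup_iff_count_le_one.mpr (fun a => by have := hc a; omega))
    rcases this with ⟨c, hc⟩
    refine ⟨c, List.count_pos_iff.mp (by omega), by omega⟩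

-- ===== VERDICT (by name: the statement is the Claim_ definition above) =====
theorem check_is_start_packet_spec : Claim_equal_check_is_start_packet := by
  intro idx datastream size _
  unfold Spec_check_is_start_packet check_is_start_packet check_is_start_packet_alt
  set w := PySem.List.slice datastream.toList (some (idx - (size - 1))) (some (idx + 1)) with hw
  by_cases h : idx < size - 1
  · simp [h, show ¬ (size - 1 ≤ idx) by omega]
  · simp only [h, decide_false, Bool.false_or, show size - 1 ≤ idx by omega, decide_true,
      Bool.true_and]
    by_cases hn : w.Nodup
    · have h1 : w.any (fun c => decide (2 < (PySem.Chars.splitOn w [c]).length)) = false := by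
        cases hany : w.any (fun c => decide (2 < (PySem.Chars.splitOn w [c]).length))
        · rfl
        · exact absurd ((any_split_iff w).mp hany) (not_not_intro hn)
      rw [h1]
      simp [(length_ofList_eq_iff w).mpr hn]
    · rw [(any_split_iff w).mpr hn]
      simp only [Bool.not_true]
      exact (decide_eq_false (fun h' => hn ((length_ofList_eq_iff w).mp h'))).symm
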